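-- pv_equiv track=rewrite | github.com/elisgitpage/advent-of-code-2018 | Day-2.py | one_off
-- ===== SOURCE A (Python) =====
-- def one_off(a: str, b: str):
--     common = ''
--     off_count = 0
--     for l in range(0, a.__len__()):
--         if a[l] != b[l]:
--             common = a[:l] + a[l+1:]
--             off_count += 1
--
--     if off_count == 1:
--         return common
--     else:
--         return None
-- ===== SOURCE B (Python) =====
-- def one_off(a: str, b: str):
--     n = len(a)
--     i = 0
--     while i < n and a[i] == b[i]:
--         i += 1
--     if i == n:
--         return None
--     j = i + 1
--     while j < n and a[j] == b[j]:
--         j += 1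
--     if j == n:
--         return a[:i] + a[i+1:]
--     return None
-- ===== Notes on version B (the rewrite author's own statement) =====
-- stated objective: faster
-- what changed: Replaces the count-all-mismatches-and-slice-inside-the-loop strategy with a two-phase early-exit scan: advance to the first mismatch, then verify the rest matches, returning as soon as a second mismatch is seen; no counter and no slice is built during scanning.
import Mathlib
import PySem

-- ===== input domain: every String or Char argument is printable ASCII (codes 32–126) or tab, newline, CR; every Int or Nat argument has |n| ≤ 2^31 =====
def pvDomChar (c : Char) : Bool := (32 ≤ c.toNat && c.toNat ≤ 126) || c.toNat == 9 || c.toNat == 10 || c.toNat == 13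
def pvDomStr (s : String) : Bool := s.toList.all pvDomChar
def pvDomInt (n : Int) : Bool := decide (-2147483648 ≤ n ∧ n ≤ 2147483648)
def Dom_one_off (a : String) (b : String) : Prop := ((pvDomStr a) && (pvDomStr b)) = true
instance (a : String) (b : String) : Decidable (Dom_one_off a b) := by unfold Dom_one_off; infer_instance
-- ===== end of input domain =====

-- B replaces A's count-all-mismatches loop by an early-exit two-phase scan (find first
-- mismatch, then verify the rest matches), slicing once at the end; no counter, no slice
-- built while scanning.

-- ===== PORT A =====
-- for l in range(0, len(a)): if a[l] != b[l]: common = a[:l]+a[l+1:]; off_count += 1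
def one_off (a : String) (b : String) : Option String :=
  let st := (PySem.List.pyRange 0 (PySem.Str.len a) 1).foldl
    (fun (st : List Char × Int) l =>
      if PySem.List.pyGet? a.toList l ≠ PySem.List.pyGet? b.toList l then
        (PySem.Chars.slice a.toList none (some l) ++ PySem.Chars.slice a.toList (some (l + 1)) none, st.2 + 1)
      else st) ([], 0)
  if st.2 = 1 then some (String.ofList st.1) else none

-- ===== PORT B =====
-- while i < n and a[i] == b[i]: i += 1   (fuel = remaining iterations, ≥ (n-i).toNat)
def scanEq (a : String) (b : String) (n : Int) : Int → Nat → Int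
  | i, 0 => i
  | i, f + 1 =>
    if i < n ∧ PySem.List.pyGet? a.toList i = PySem.List.pyGet? b.toList i then
      scanEq a b n (i + 1) f
    else i

def one_off_alt (a : String) (b : String) : Option String :=
  let n := PySem.Str.len a
  let i := scanEq a b n 0 n.toNat
  if i = n then none
  else
    let j := scanEq a b n (i + 1) n.toNat
    if j = n then
      some (String.ofList (PySem.Chars.slice a.toList none (some i) ++
                           PySem.Chars.slice a.toList (some (i + 1)) none))
    else none

-- ===== PRECONDITION & SPEC =====
-- Pre_ excludes exactly the inputs where Python A raises IndexError: b shorter than a (b[l] for l < len(a)).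
def Pre_one_off (a : String) (b : String) : Prop := a.toList.length ≤ b.toList.length
instance (a : String) (b : String) : Decidable (Pre_one_off a b) := by unfold Pre_one_off; infer_instance
def pvWitness_one_off : String × String := ("abc", "axc")

def Spec_one_off (a : String) (b : String) (out : Option String) : Prop := out = one_off_alt a b
instance (a : String) (b : String) (out : Option String) : Decidable (Spec_one_off a b out) := by unfold Spec_one_off; infer_instance

-- ===== CLAIM =====
def Claim_equal_one_off : Prop := ∀ (a : String) (b : String), Dom_one_off a b → Pre_one_off a b → Spec_one_off a b (one_off a b)

-- ===== LEMMAS AND PROOFS =====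

-- A's loop equals: fold the slice over the filtered (differing) indices, and count them.
theorem foldA_eq (p : Int → Prop) [DecidablePred p] (sl : Int → List Char) :
    ∀ (L : List Int) (c : List Char) (k : Int),
      L.foldl (fun (st : List Char × Int) l => if p l then (sl l, st.2 + 1) else st) (c, k)
        = ((L.filter (fun l => decide (p l))).foldl (fun _ l => sl l) c,
           k + ((L.filter (fun l => decide (p l))).length : Int)) := by
  intro L
  induction L with
  | nil => intro c k; simp
  | cons hd tl ih =>
    intro c k
    by_cases h : p hd
    · simp [List.foldl_cons, h, ih]
      omega
    · simp [List.foldl_cons, h, ih]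

-- the scan returns the first index ≥ i at which a and b differ, or n if there is none
theorem scanEq_spec (a b : String) (n : Int) :
    ∀ (fuel : Nat) (i : Int), 0 ≤ i → i ≤ n → (n - i).toNat ≤ fuel →
      i ≤ scanEq a b n i fuel ∧ scanEq a b n i fuel ≤ n ∧
      (∀ j, i ≤ j → j < scanEq a b n i fuel →
        PySem.List.pyGet? a.toList j = PySem.List.pyGet? b.toList j) ∧
      (scanEq a b n i fuel < n →
        PySem.List.pyGet? a.toList (scanEq a b n i fuel) ≠ PySem.List.pyGet? b.toList (scanEq a b n i fuel)) := by
  intro fuel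
  induction fuel with
  | zero =>
    intro i h0 hn hf
    have : i = n := by omega
    simp [scanEq, this]
    omega
  | succ f ih =>
    intro i h0 hn hf
    by_cases hc : i < n ∧ PySem.List.pyGet? a.toList i = PySem.List.pyGet? b.toList i
    · have hrec := ih (i + 1) (by omega) (by omega) (by omega)
      simp only [scanEq, if_pos hc]
      refine ⟨by omega, hrec.2.1, ?_, hrec.2.2.2⟩
      intro j hij hjr
      rcases eq_or_lt_of_le hij with h | h
      · exact h ▸ hc.2
      · exact hrec.2.2.1 j (by omega) hjr
    · simp only [scanEq, if_neg hc]
      refine ⟨le_refl i, hn, by omega, ?_⟩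
      intro hin heq
      exact hc ⟨hin, heq⟩

-- A returns some(slice) iff exactly one index differs
theorem one_off_char (a b : String) :
    one_off a b =
      (match (PySem.List.pyRange 0 (PySem.Str.len a) 1).filter
          (fun i => PySem.List.pyGet? a.toList i ≠ PySem.List.pyGet? b.toList i) with
       | [i] => some (String.ofList (PySem.Chars.slice a.toList none (some i) ++
                                     PySem.Chars.slice a.toList (some (i + 1)) none))
       | _ => none) := by
  unfold one_off
  rw [foldA_eq (fun l => PySem.List.pyGet? a.toList l ≠ PySem.List.pyGet? b.toList l)
        (fun l => PySem.Chars.slice a.toList none (some l) ++ PySem.Chars.slice a.toList (some (l + 1)) none)]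
  cases hF : (PySem.List.pyRange 0 (PySem.Str.len a) 1).filter
      (fun i => decide (PySem.List.pyGet? a.toList i ≠ PySem.List.pyGet? b.toList i)) with
  | nil => simp
  | cons i rest =>
    cases rest with
    | nil => simp
    | cons j rest' =>
      simp [List.foldl_cons]
      omega

theorem one_off_eq_alt (a b : String) : one_off a b = one_off_alt a b := by
  rw [one_off_char]
  set n := PySem.Str.len a with hn
  have hn0 : 0 ≤ n := by simp [hn, PySem.Str.len]
  set p : Int → Prop := fun i => PySem.List.pyGet? a.toList i ≠ PySem.List.pyGet? b.toList i with hp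
  set F := (PySem.List.pyRange 0 n 1).filter
      (fun i => PySem.List.pyGet? a.toList i ≠ PySem.List.pyGet? b.toList i) with hFdef
  have hmemF : ∀ x, x ∈ F ↔ (0 ≤ x ∧ x < n ∧ p x) := by
    intro x
    simp [hFdef, List.mem_filter, PySem.List.mem_pyRange_one, hp, and_assoc]
  have hnodupF : F.Nodup := List.Nodup.filter _ (PySem.List.nodup_pyRange_one 0 n)
  have h1 := scanEq_spec a b n n.toNat 0 (le_refl 0) hn0 (by omega)
  set r1 := scanEq a b n 0 n.toNat with hr1
  have halt : one_off_alt a b =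
      (if r1 = n then none
       else if scanEq a b n (r1 + 1) n.toNat = n then
         some (String.ofList (PySem.Chars.slice a.toList none (some r1) ++
                              PySem.Chars.slice a.toList (some (r1 + 1)) none))
       else none) := rfl
  rw [halt]
  by_cases hcase1 : r1 = n
  · -- no mismatch at all: F = []
    have hFnil : F = [] := by
      rw [List.eq_nil_iff_forall_not_mem]
      intro x hx
      have hm := (hmemF x).1 hx
      exact hm.2.2 (h1.2.2.1 x hm.1 (by omega))
    rw [if_pos hcase1, hFnil]
  · have hr1n : r1 < n := lt_of_le_of_ne h1.2.1 hcase1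
    have hpr1 : p r1 := h1.2.2.2 hr1n
    have hr1F : r1 ∈ F := (hmemF r1).2 ⟨by omega, hr1n, hpr1⟩
    have h2 := scanEq_spec a b n n.toNat (r1 + 1) (by have := h1.1; omega) (by omega) (by have := h1.1; omega)
    set r2 := scanEq a b n (r1 + 1) n.toNat with hr2
    by_cases hcase2 : r2 = n
    · -- exactly one mismatch, at r1: F = [r1]
      have honly : ∀ x ∈ F, x = r1 := by
        intro x hx
        have hm := (hmemF x).1 hx
        by_contra hne
        rcases lt_or_gt_of_ne hne with h | h
        · exact hm.2.2 (h1.2.2.1 x hm.1 h)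
        · exact hm.2.2 (h2.2.2.1 x (by omega) (by omega))
      have hFone : F = [r1] := by
        cases hF : F with
        | nil => rw [hF] at hr1F; exact absurd hr1F (List.not_mem_nil)
        | cons x t =>
          have hx : x = r1 := honly x (by rw [hF]; exact List.mem_cons_self)
          cases ht : t with
          | nil => rw [hx]
          | cons y t' =>
            have hy : y = r1 := honly y (by rw [hF, ht]; simp)
            have hnd := hnodupF
            rw [hF, ht, hx, hy] at hnd
            simp at hnd
      rw [if_neg hcase1, if_pos hcase2, hFone]
    · -- a second mismatch at r2 > r1: F has at least two elements
      have hr2n : r2 < n := lt_of_le_of_ne h2.2.1 hcase2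
      have hpr2 : p r2 := h2.2.2.2 hr2n
      have hr2F : r2 ∈ F := (hmemF r2).2 ⟨by omega, hr2n, hpr2⟩
      have hne12 : r1 ≠ r2 := by omega
      rw [if_neg hcase1, if_neg hcase2]
      cases hF : F with
      | nil => simp [hF] at hr1F
      | cons x t =>
        cases ht : t with
        | nil =>
          rw [hF, ht] at hr1F hr2F
          simp only [List.mem_singleton] at hr1F hr2F
          exact absurd (hr1F.trans hr2F.symm) hne12
        | cons y t' => rfl

-- ===== VERDICT =====
theorem one_off_spec : Claim_equal_one_off := by
  intro a b _ _
  unfold Spec_one_off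
  exact one_off_eq_alt a b
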